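-- pv_equiv track=rewrite | github.com/MouazAlhorani/backend_018 | django/app_018/mz_function.py | encryptpass
-- ===== SOURCE A (Python) =====
-- key='MysecretMzZzH'
--
-- def encryptpass(text ,keys):
--     if len(text)!=1:
--         if len(keys)!=0:
--             return (text[0]+keys[0]) + encryptpass(text[1:],keys[1:])
--         elif len(text)!=0:
--             keys=key
--             return (text[0]+keys[0]) + encryptpass(text[1:],keys[1:])
--         else:
--             return keys
--     else:
--         return text
-- ===== SOURCE B (Python) =====
-- key='MysecretMzZzH'
--
-- def encryptpass(text, keys):
--     if not text:
--         return ''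
--     body = text[:-1]
--     stream = keys + key * len(body)
--     return ''.join(c + k for c, k in zip(body, stream)) + text[-1]
-- ===== Notes on version B (the rewrite author's own statement) =====
-- stated objective: faster
-- what changed: Replaced the O(n^2) recursion with per-call string slicing/concatenation by a single pass that builds the full key stream once (keys followed by repetitions of the global key) and zips it with the text body, joining the result.
import Mathlib
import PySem

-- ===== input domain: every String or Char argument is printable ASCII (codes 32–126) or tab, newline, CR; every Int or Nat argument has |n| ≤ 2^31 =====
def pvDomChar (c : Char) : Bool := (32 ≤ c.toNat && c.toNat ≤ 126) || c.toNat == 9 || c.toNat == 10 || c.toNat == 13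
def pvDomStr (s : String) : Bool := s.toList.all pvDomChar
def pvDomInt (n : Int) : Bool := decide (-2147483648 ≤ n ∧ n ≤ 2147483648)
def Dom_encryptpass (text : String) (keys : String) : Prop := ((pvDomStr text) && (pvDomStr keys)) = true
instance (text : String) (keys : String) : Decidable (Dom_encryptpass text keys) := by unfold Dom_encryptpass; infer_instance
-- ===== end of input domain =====

-- B replaces A's O(n^2) slicing recursion by one linear pass: build the key stream
-- (keys ++ enough copies of the global key) once and zip it with the text body.


-- ===== PORT A =====
-- module-level constant: key = 'MysecretMzZzH'
def pvKey : List Char := "MysecretMzZzH".toList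

-- literal transliteration of A's recursion on the character list of the strings;
-- the '[]' fallback arms are the inputs where Python raises IndexError (text = ''),
-- excluded by Pre_encryptpass.
def encA (t ks : List Char) : List Char :=
  if t.length ≠ 1 then
    if ks.length ≠ 0 then
      match t, ks with
      | c :: tr, k :: kr => c :: k :: encA tr kr
      | _, _ => []
    else if t.length ≠ 0 then
      match t, pvKey with
      | c :: tr, k :: kr => c :: k :: encA tr kr
      | _, _ => []
    else ks
  else t
termination_by t.length
decreasing_by all_goals simp_all [List.length_cons]

def encryptpass (text : String) (keys : String) : String :=
  String.ofList (encA text.toList keys.toList)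

-- ===== PORT B =====
-- transliteration of Source B: body = text[:-1]; stream = keys + key*len(body);
-- ''.join(c+k for c,k in zip(body, stream)) + text[-1]
def encB (t ks : List Char) : List Char :=
  if h : t = [] then []
  else
    let body := t.dropLast
    let stream := ks ++ (List.replicate body.length pvKey).flatten
    (body.zip stream).flatMap (fun p => [p.1, p.2]) ++ [t.getLast h]

def encryptpass_alt (text : String) (keys : String) : String :=
  String.ofList (encB text.toList keys.toList)

-- ===== PRECONDITION & SPEC =====
-- Pre_ excludes exactly the inputs where A raises IndexError: empty text with nonempty keys.
def Pre_encryptpass (text : String) (keys : String) : Prop := text ≠ "" ∨ keys = ""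
instance (text : String) (keys : String) : Decidable (Pre_encryptpass text keys) := by
  unfold Pre_encryptpass; infer_instance
def pvWitness_encryptpass : String × String := ("ab", "x")

def Spec_encryptpass (text : String) (keys : String) (out : String) : Prop := out = encryptpass_alt text keys
instance (text : String) (keys : String) (out : String) : Decidable (Spec_encryptpass text keys out) := by unfold Spec_encryptpass; infer_instance

-- ===== CLAIM (what is proved, stated in full; the proofs are below) =====
def Claim_equal_encryptpass : Prop := ∀ (text : String) (keys : String), Dom_encryptpass text keys → Pre_encryptpass text keys → Spec_encryptpass text keys (encryptpass text keys)

-- ===== LEMMAS AND PROOFS =====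

theorem pvKey_cons : pvKey = 'M' :: "ysecretMzZzH".toList := by decide

theorem rep_flat_len (n : ℕ) : ((List.replicate n pvKey).flatten).length = 13 * n := by
  induction n with
  | zero => simp
  | succ m ih =>
    rw [List.replicate_succ, List.flatten_cons, List.length_append, ih]
    have h13 : pvKey.length = 13 := by decide
    rw [h13]; ring

theorem zip_take_right {α β : Type} (l : List α) (s : List β) :
    l.zip s = l.zip (s.take l.length) := by
  induction l generalizing s with
  | nil => simp
  | cons a l ih =>
    cases s with
    | nil => simp
    | cons b s =>
      simp only [List.length_cons, List.take_succ_cons, List.zip_cons_cons]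
      exact congrArg _ (ih s)

theorem stream_take_eq (kr : List Char) (n : ℕ) :
    (kr ++ (List.replicate (n + 1) pvKey).flatten).take n
      = (kr ++ (List.replicate n pvKey).flatten).take n := by
  have hrep : (List.replicate (n + 1) pvKey).flatten
      = (List.replicate n pvKey).flatten ++ pvKey := by
    rw [List.replicate_succ', List.flatten_append]; simp
  rw [hrep, ← List.append_assoc]
  refine List.take_append_of_le_length ?_
  rw [List.length_append, rep_flat_len]
  omega

theorem encA_eq_encB : ∀ (t ks : List Char), encA t ks = encB t ks := by
  intro t
  induction t with
  | nil =>
    intro ks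
    cases ks <;> simp [encA, encB]
  | cons c tr ih =>
    intro ks
    cases tr with
    | nil =>
      have ha : encA [c] ks = [c] := by
        rw [encA.eq_def, if_neg (by simp)]
      have hb : encB [c] ks = [c] := by
        simp only [encB]
        rw [dif_neg (show ¬([c] : List Char) = [] by simp)]
        simp
      rw [ha, hb]
    | cons d tr' =>
      have hne : (d :: tr' : List Char) ≠ [] := by simp
      have h1 : (c :: d :: tr' : List Char) ≠ [] := by simp
      cases ks with
      | cons k kr =>
        rw [show encA (c :: d :: tr') (k :: kr) = c :: k :: encA (d :: tr') kr by
              rw [encA]; simp]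
        rw [ih kr]
        simp only [encB, dif_neg h1, dif_neg hne,
          List.dropLast_cons_of_ne_nil hne, List.getLast_cons hne,
          List.cons_append, List.zip_cons_cons, List.flatMap_cons, List.cons_append]
        simp only [List.cons.injEq, true_and]
        congr 2
        rw [zip_take_right ((d :: tr').dropLast),
            zip_take_right ((d :: tr').dropLast) (kr ++ _)]
        congr 1
        rw [show (c :: (d :: tr').dropLast).length = (d :: tr').dropLast.length + 1 from rfl]
        exact (stream_take_eq kr _).symm
      | nil =>
        rw [show encA (c :: d :: tr') [] = c :: 'M' :: encA (d :: tr') ("ysecretMzZzH".toList) by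
              rw [encA.eq_def]; simp [pvKey_cons]]
        rw [ih]
        simp only [encB, dif_neg h1, dif_neg hne,
          List.dropLast_cons_of_ne_nil hne, List.getLast_cons hne, List.nil_append]
        rw [show (c :: (d :: tr').dropLast).length = (d :: tr').dropLast.length + 1 from rfl,
          List.replicate_succ, List.flatten_cons, pvKey_cons, List.cons_append,
          List.zip_cons_cons, List.flatMap_cons]
        simp

-- ===== VERDICT (by name: the statement is the Claim_ definition above) =====
theorem encryptpass_spec : Claim_equal_encryptpass := by
  intro text keys _ _
  unfold Spec_encryptpass encryptpass encryptpass_alt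
  rw [encA_eq_encB]
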